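-- pv_equiv track=rewrite | github.com/M2Bio/foundations-of-sequence-analysis | Uebung/Blatt10/Aufgabe1/Alignment/editgraph.py | bits_pretty
-- ===== SOURCE A (Python) =====
-- def seteopbits():
--   return 1 << 2, 1 << 1, 1
--
-- def bits_pretty(minedgebits):
--   l = list()
--   dbit, ibit, rbit = seteopbits()
--   for mask in [dbit,ibit,rbit]:
--     if minedgebits & mask:
--       l.append('1')
--     else:
--       l.append('0')
--   return ''.join(l)
-- ===== SOURCE B (Python) =====
-- def bits_pretty(minedgebits):
--     # closed form: the three masks 4,2,1 are exactly the low three binary digits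
--     return format(minedgebits & 7, '03b')
-- ===== Notes on version B (the rewrite author's own statement) =====
-- stated objective: idiomatic
-- what changed: Replaces the per-mask loop with list accumulation and join by a single closed-form render: mask off the low three bits and format them directly as a fixed-width binary string.
import Mathlib
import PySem

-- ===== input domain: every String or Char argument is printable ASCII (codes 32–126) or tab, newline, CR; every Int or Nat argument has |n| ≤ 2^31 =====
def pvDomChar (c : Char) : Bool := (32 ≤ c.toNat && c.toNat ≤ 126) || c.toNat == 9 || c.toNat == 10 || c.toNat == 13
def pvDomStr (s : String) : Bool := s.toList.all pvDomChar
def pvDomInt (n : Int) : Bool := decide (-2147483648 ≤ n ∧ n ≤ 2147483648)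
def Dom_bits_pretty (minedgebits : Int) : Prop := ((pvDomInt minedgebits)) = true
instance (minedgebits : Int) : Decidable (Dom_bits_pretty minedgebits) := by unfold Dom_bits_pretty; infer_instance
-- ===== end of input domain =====

-- B replaces A's per-mask loop + list + join by a closed-form render of the low three bits
-- (format(minedgebits & 7, '03b')); objective: idiomatic, same cost.

-- ===== PORT A =====
def seteopbits : Int × Int × Int := ((1 : Int) <<< 2, (1 : Int) <<< 1, 1)

def bits_pretty (minedgebits : Int) : String :=
  let l : List String := []
  let dbit := seteopbits.1
  let ibit := seteopbits.2.1
  let rbit := seteopbits.2.2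
  let l := [dbit, ibit, rbit].foldl
    (fun l mask => if PySem.Int.band minedgebits mask ≠ 0 then l ++ ["1"] else l ++ ["0"]) l
  PySem.Str.join "" l

-- ===== PORT B =====
-- format(n, '03b') hand-ported for 0 ≤ n < 8 (which n = minedgebits & 7 always satisfies):
-- the three binary digits, most significant first; exact on that range.
def bits_pretty_alt (minedgebits : Int) : String :=
  let n := (PySem.Int.band minedgebits 7).toNat
  String.ofList [(if n.testBit 2 then '1' else '0'),
             (if n.testBit 1 then '1' else '0'),
             (if n.testBit 0 then '1' else '0')]

-- ===== PRECONDITION & SPEC =====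
def Spec_bits_pretty (minedgebits : Int) (out : String) : Prop := out = bits_pretty_alt minedgebits
instance (minedgebits : Int) (out : String) : Decidable (Spec_bits_pretty minedgebits out) := by unfold Spec_bits_pretty; infer_instance

-- ===== CLAIM (what is proved, stated in full; the proofs are below) =====
def Claim_equal_bits_pretty : Prop := ∀ (minedgebits : Int), Dom_bits_pretty minedgebits → Spec_bits_pretty minedgebits (bits_pretty minedgebits)

-- ===== LEMMAS AND PROOFS =====

-- Nat facts: masking with 4/2/1 commutes with Python's two's-complement reading via j = -m-1.
theorem pvAux (j c : Nat) (hc : (7 : Nat) &&& c = c) (hle : c ≤ 7) :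
    c - (c &&& j) = (7 - (j &&& 7)) &&& c := by
  have h : (j &&& 7) &&& c = c &&& j := by
    rw [Nat.and_assoc, hc, Nat.and_comm]
  rw [← h]
  have ht : j &&& 7 ≤ 7 := Nat.and_le_right
  generalize j &&& 7 = t at *
  interval_cases t <;> interval_cases c <;> decide

theorem pvAndSeven (k c : Nat) (hc : (7 : Nat) &&& c = c) : (k &&& 7) &&& c = k &&& c := by
  rw [Nat.and_assoc, hc]

-- Every input is band-equivalent (on masks 7,4,2,1) to some s < 8.
theorem pvKey (m : Int) : ∃ s : Nat, s < 8 ∧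
    PySem.Int.band m 7 = PySem.Int.band (s : Int) 7 ∧
    PySem.Int.band m 4 = PySem.Int.band (s : Int) 4 ∧
    PySem.Int.band m 2 = PySem.Int.band (s : Int) 2 ∧
    PySem.Int.band m 1 = PySem.Int.band (s : Int) 1 := by
  by_cases hm : (0 : Int) ≤ m
  case pos =>
    obtain ⟨k, rfl⟩ : ∃ k : Nat, m = (k : Int) := ⟨m.toNat, (Int.toNat_of_nonneg hm).symm⟩
    refine ⟨k &&& 7, by have := Nat.and_le_right (n := k) (m := 7); omega, ?_, ?_, ?_, ?_⟩ <;>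
    · have h1 := PySem.Int.band_natCast k 7
      have h2 := PySem.Int.band_natCast (k &&& 7) 7
      have h3 := PySem.Int.band_natCast k 4
      have h4 := PySem.Int.band_natCast (k &&& 7) 4
      have h5 := PySem.Int.band_natCast k 2
      have h6 := PySem.Int.band_natCast (k &&& 7) 2
      have h7 := PySem.Int.band_natCast k 1
      have h8 := PySem.Int.band_natCast (k &&& 7) 1
      simp only [Nat.cast_ofNat, Nat.cast_one] at h1 h2 h3 h4 h5 h6 h7 h8
      simp only [h1, h2, h3, h4, h5, h6, h7, h8,
        pvAndSeven k 7 (by decide), pvAndSeven k 4 (by decide),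
        pvAndSeven k 2 (by decide), pvAndSeven k 1 (by decide)]
  case neg =>
    refine ⟨7 - (((-m - 1).toNat) &&& 7), by omega, ?_, ?_, ?_, ?_⟩ <;>
    · have hb : ∀ c : Nat, (7 : Nat) &&& c = c → c ≤ 7 →
          PySem.Int.band m (c : Int) = PySem.Int.band ((7 - (((-m - 1).toNat) &&& 7) : Nat) : Int) (c : Int) := by
        intro c hc hle
        have hnc : (0 : Int) ≤ (c : Int) := by positivity
        have hleft : PySem.Int.band m (c : Int) = ((c - (c &&& (-m - 1).toNat) : Nat) : Int) := by
          simp only [PySem.Int.band, if_neg (by omega : ¬ (0 : Int) ≤ m), if_pos hnc, Int.toNat_natCast]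
        have hright := PySem.Int.band_natCast (7 - (((-m - 1).toNat) &&& 7)) c
        rw [hleft, hright, pvAux ((-m - 1).toNat) c hc hle]
      have h7 := hb 7 (by decide) (by decide)
      have h4 := hb 4 (by decide) (by decide)
      have h2 := hb 2 (by decide) (by decide)
      have h1 := hb 1 (by decide) (by decide)
      simp only [Nat.cast_ofNat, Nat.cast_one] at h7 h4 h2 h1
      simp only [h7, h4, h2, h1]

theorem pvMain (m : Int) : bits_pretty m = bits_pretty_alt m := by
  obtain ⟨s, hs, h7, h4, h2, h1⟩ := pvKey m
  have hA : bits_pretty m = bits_pretty (s : Int) := by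
    simp only [bits_pretty, seteopbits]
    rw [(by decide : (1 : Int) <<< 2 = 4), (by decide : (1 : Int) <<< 1 = 2)]
    simp only [List.foldl, h4, h2, h1]
  have hB : bits_pretty_alt m = bits_pretty_alt (s : Int) := by
    simp only [bits_pretty_alt, h7]
  rw [hA, hB]
  interval_cases s <;> decide

-- ===== VERDICT (by name: the statement is the Claim_ definition above) =====
theorem bits_pretty_spec : Claim_equal_bits_pretty := by
  intro m _
  exact pvMain m
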